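-- pv_equiv track=rewrite | github.com/swayam8624/ReliQuary | security/audit_framework.py | _assess_overall_risk
-- ===== SOURCE A (Python) =====
-- from typing import Dict, List, Optional, Any
--
-- def _assess_overall_risk(results: Dict[str, Any]) -> str:
--     """Assess overall risk level"""
--     critical_count = len([v for v in results["vulnerabilities_found"] if v["severity"] == "CRITICAL"])
--     high_count = len([v for v in results["vulnerabilities_found"] if v["severity"] == "HIGH"])
--
--     if critical_count > 0:
--         return "CRITICAL"
--     elif high_count > 0:
--         return "HIGH"
--     else:
--         return "MEDIUM"
-- ===== SOURCE B (Python) =====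
-- def _assess_overall_risk(results):
--     """Assess overall risk level"""
--     worst = 0
--     for v in results["vulnerabilities_found"]:
--         s = v["severity"]
--         worst = max(worst, 2 if s == "CRITICAL" else 1 if s == "HIGH" else 0)
--     return ("MEDIUM", "HIGH", "CRITICAL")[worst]
-- ===== Notes on version B (the rewrite author's own statement) =====
-- stated objective: simpler
-- what changed: B replaces the two filtered counts and branch cascade by one pass keeping a running worst-severity rank (CRITICAL=2, HIGH=1, else 0) and mapping the final maximum back to a label.
import Mathlib
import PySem

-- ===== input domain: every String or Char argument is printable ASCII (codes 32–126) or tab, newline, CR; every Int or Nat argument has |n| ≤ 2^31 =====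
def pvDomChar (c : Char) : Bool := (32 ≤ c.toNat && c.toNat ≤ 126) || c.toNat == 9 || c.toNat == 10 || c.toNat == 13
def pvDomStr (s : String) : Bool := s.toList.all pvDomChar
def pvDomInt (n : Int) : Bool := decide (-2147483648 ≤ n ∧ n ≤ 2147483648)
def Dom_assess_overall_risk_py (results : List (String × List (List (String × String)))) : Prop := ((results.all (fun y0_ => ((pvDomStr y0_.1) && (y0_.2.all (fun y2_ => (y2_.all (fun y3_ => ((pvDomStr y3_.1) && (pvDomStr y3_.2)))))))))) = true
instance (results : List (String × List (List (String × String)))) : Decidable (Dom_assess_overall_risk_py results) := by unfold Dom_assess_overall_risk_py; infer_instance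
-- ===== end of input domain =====

-- B keeps one running worst-severity rank instead of A's two filtered counts; return values proved equal (simpler, not faster).

-- ===== PORT A =====
-- v["severity"] as a dict lookup (none = KeyError, excluded by Pre_)
def pvSev (v : List (String × String)) : Option String :=
  (PySem.Dict.ofList v).get? "severity"

def assess_overall_risk_py (results : List (String × List (List (String × String)))) : String :=
  let vulns := ((PySem.Dict.ofList results).get? "vulnerabilities_found").getD []
  let critical_count := (vulns.filter (fun v => pvSev v == some "CRITICAL")).length
  let high_count := (vulns.filter (fun v => pvSev v == some "HIGH")).length
  if critical_count > 0 then "CRITICAL"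
  else if high_count > 0 then "HIGH"
  else "MEDIUM"

-- ===== PORT B =====
def pvPrio (v : List (String × String)) : Nat :=
  match pvSev v with
  | some "CRITICAL" => 2
  | some "HIGH" => 1
  | _ => 0

def assess_overall_risk_py_alt (results : List (String × List (List (String × String)))) : String :=
  let vulns := ((PySem.Dict.ofList results).get? "vulnerabilities_found").getD []
  let worst := vulns.foldl (fun acc v => max acc (pvPrio v)) 0
  if worst = 2 then "CRITICAL" else if worst = 1 then "HIGH" else "MEDIUM"

-- ===== PRECONDITION & SPEC =====
-- Pre_ excludes exactly the inputs where Python A raises KeyError: a missing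
-- "vulnerabilities_found" key, or a vulnerability without a "severity" key.
def Pre_assess_overall_risk_py (results : List (String × List (List (String × String)))) : Prop :=
  ((PySem.Dict.ofList results).get? "vulnerabilities_found").isSome = true ∧
  ∀ v ∈ ((PySem.Dict.ofList results).get? "vulnerabilities_found").getD [],
    (PySem.Dict.ofList v).contains "severity" = true
instance (results : List (String × List (List (String × String)))) : Decidable (Pre_assess_overall_risk_py results) := by unfold Pre_assess_overall_risk_py; infer_instance

def pvWitness_assess_overall_risk_py : (List (String × List (List (String × String)))) :=
  [("vulnerabilities_found", [[("severity", "HIGH")], [("severity", "LOW")]])]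

def Spec_assess_overall_risk_py (results : List (String × List (List (String × String)))) (out : String) : Prop := out = assess_overall_risk_py_alt results
instance (results : List (String × List (List (String × String)))) (out : String) : Decidable (Spec_assess_overall_risk_py results out) := by unfold Spec_assess_overall_risk_py; infer_instance

-- ===== CLAIM (what is proved, stated in full; the proofs are below) =====
def Claim_equal_assess_overall_risk_py : Prop := ∀ (results : List (String × List (List (String × String)))), Dom_assess_overall_risk_py results → Pre_assess_overall_risk_py results → Spec_assess_overall_risk_py results (assess_overall_risk_py results)

-- ===== LEMMAS AND PROOFS =====

lemma foldl_max_acc (vs : List (List (String × String))) (a : Nat) :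
    vs.foldl (fun acc v => max acc (pvPrio v)) a
      = max a (vs.foldl (fun acc v => max acc (pvPrio v)) 0) := by
  induction vs generalizing a with
  | nil => simp
  | cons v vs ih =>
    simp only [List.foldl_cons]
    rw [ih (max a (pvPrio v)), ih (max 0 (pvPrio v))]
    omega

lemma prio_le_two (v : List (String × String)) : pvPrio v ≤ 2 := by
  unfold pvPrio
  split <;> omega

lemma worst_le_two (vs : List (List (String × String))) :
    vs.foldl (fun acc v => max acc (pvPrio v)) 0 ≤ 2 := by
  induction vs with
  | nil => simp
  | cons v vs ih =>
    simp only [List.foldl_cons]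
    rw [foldl_max_acc]
    have := prio_le_two v
    omega

lemma prio_eq_two (v : List (String × String)) :
    pvPrio v = 2 ↔ (pvSev v == some "CRITICAL") = true := by
  unfold pvPrio
  split <;> rename_i h <;> simp_all

lemma prio_eq_one (v : List (String × String)) :
    pvPrio v = 1 ↔ (pvSev v == some "HIGH") = true := by
  unfold pvPrio
  split <;> rename_i h <;> simp_all

lemma foldl_max_cons (v : List (String × String)) (vs : List (List (String × String))) :
    (v :: vs).foldl (fun acc v => max acc (pvPrio v)) 0
      = max (pvPrio v) (vs.foldl (fun acc v => max acc (pvPrio v)) 0) := by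
  simp only [List.foldl_cons]
  rw [foldl_max_acc]
  omega

lemma mem_le_worst (vs : List (List (String × String))) :
    ∀ v ∈ vs, pvPrio v ≤ vs.foldl (fun acc v => max acc (pvPrio v)) 0 := by
  induction vs with
  | nil => simp
  | cons w ws ih =>
    intro v hv
    rw [foldl_max_cons]
    rcases List.mem_cons.mp hv with h | h
    · subst h; omega
    · have := ih v h; omega

lemma worst_attained (vs : List (List (String × String))) :
    vs.foldl (fun acc v => max acc (pvPrio v)) 0 = 0 ∨
    ∃ v ∈ vs, pvPrio v = vs.foldl (fun acc v => max acc (pvPrio v)) 0 := by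
  induction vs with
  | nil => simp
  | cons w ws ih =>
    rw [foldl_max_cons]
    by_cases h : ws.foldl (fun acc v => max acc (pvPrio v)) 0 ≤ pvPrio w
    · right; exact ⟨w, List.mem_cons_self, by omega⟩
    · rcases ih with h0 | ⟨v, hv, he⟩
      · omega
      · right; exact ⟨v, List.mem_cons_of_mem _ hv, by omega⟩

lemma core_eq (vs : List (List (String × String))) :
    (if 0 < (vs.filter (fun v => pvSev v == some "CRITICAL")).length then "CRITICAL"
     else if 0 < (vs.filter (fun v => pvSev v == some "HIGH")).length then "HIGH"
     else "MEDIUM")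
    = (let worst := vs.foldl (fun acc v => max acc (pvPrio v)) 0;
       if worst = 2 then "CRITICAL" else if worst = 1 then "HIGH" else "MEDIUM") := by
  have hle := worst_le_two vs
  have hml := mem_le_worst vs
  have hat := worst_attained vs
  have hcrit : (0 < (vs.filter (fun v => pvSev v == some "CRITICAL")).length) ↔
      vs.foldl (fun acc v => max acc (pvPrio v)) 0 = 2 := by
    constructor
    · intro h
      obtain ⟨v, hv⟩ := List.exists_mem_of_length_pos h
      rw [List.mem_filter] at hv
      have := hml v hv.1
      have := (prio_eq_two v).mpr hv.2
      omega
    · intro h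
      rcases hat with h0 | ⟨v, hv, he⟩
      · omega
      · have : (pvSev v == some "CRITICAL") = true := (prio_eq_two v).mp (by omega)
        have : v ∈ vs.filter (fun v => pvSev v == some "CRITICAL") :=
          List.mem_filter.mpr ⟨hv, this⟩
        exact List.length_pos_of_mem this
  have hhigh : vs.foldl (fun acc v => max acc (pvPrio v)) 0 = 1 →
      0 < (vs.filter (fun v => pvSev v == some "HIGH")).length := by
    intro h
    rcases hat with h0 | ⟨v, hv, he⟩
    · omega
    · have : (pvSev v == some "HIGH") = true := (prio_eq_one v).mp (by omega)
      exact List.length_pos_of_mem (List.mem_filter.mpr ⟨hv, this⟩)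
  have hzero : vs.foldl (fun acc v => max acc (pvPrio v)) 0 = 0 →
      (vs.filter (fun v => pvSev v == some "HIGH")).length = 0 := by
    intro h
    rw [List.length_eq_zero_iff, List.filter_eq_nil_iff]
    intro v hv
    have := hml v hv
    have h1 := prio_eq_one v
    simp only [Bool.not_eq_true]
    by_contra hc
    simp only [Bool.not_eq_false] at hc
    have := h1.mpr hc
    omega
  by_cases h2 : vs.foldl (fun acc v => max acc (pvPrio v)) 0 = 2
  · simp [h2, hcrit.mpr h2]
  · by_cases h1 : vs.foldl (fun acc v => max acc (pvPrio v)) 0 = 1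
    · have := hhigh h1
      have hnc : ¬ 0 < (vs.filter (fun v => pvSev v == some "CRITICAL")).length := by
        intro hc; exact h2 (hcrit.mp hc)
      simp [h1, hnc, this]
    · have h0 : vs.foldl (fun acc v => max acc (pvPrio v)) 0 = 0 := by omega
      have hnc : ¬ 0 < (vs.filter (fun v => pvSev v == some "CRITICAL")).length := by
        intro hc; exact h2 (hcrit.mp hc)
      have := hzero h0
      simp [h0, hnc, this]

-- ===== VERDICT (by name: the statement is the Claim_ definition above) =====
theorem assess_overall_risk_py_spec : Claim_equal_assess_overall_risk_py := by
  intro results _ _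
  unfold Spec_assess_overall_risk_py assess_overall_risk_py assess_overall_risk_py_alt
  exact core_eq _
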